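-- pv_equiv track=rewrite | github.com/Cyborg-Core/Algorithm_problem_program | python_version/leetcode_practise_2/lcp30.py | magicTower
-- ===== SOURCE A (Python) =====
-- import heapq
-- from typing import List
--
-- def magicTower(nums: List[int]) -> int:
--     q = []
--     if sum(nums) < -1:
--         return -1
--     blood = 1
--     count = 0
--     for n in nums:
--         if n < 0:
--             heapq.heappush(q, n)
--         blood += n
--         while blood <= 0:
--             count += 1
--             blood -= heapq.heappop(q)
--
--     return count
-- ===== SOURCE B (Python) =====
-- from typing import List
--
-- def magicTower(nums: List[int]) -> int:
--     if sum(nums) < -1: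
--         return -1
--     q = []  # postponed negatives, kept as a plain list (no heap)
--     blood = 1
--     count = 0
--     for n in nums:
--         if n < 0:
--             q.append(n)
--         blood += n
--         while blood <= 0:
--             m = min(q)
--             q.remove(m)
--             count += 1
--             blood -= m
--     return count
-- ===== Notes on version B (the rewrite author's own statement) =====
-- stated objective: alternative
-- what changed: The binary min-heap (heapq heappush/heappop with sift-up/sift-down) is replaced by a plain unordered list of postponed negatives from which each defection removes the minimum by a linear min-scan (min + remove).
import Mathlib
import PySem

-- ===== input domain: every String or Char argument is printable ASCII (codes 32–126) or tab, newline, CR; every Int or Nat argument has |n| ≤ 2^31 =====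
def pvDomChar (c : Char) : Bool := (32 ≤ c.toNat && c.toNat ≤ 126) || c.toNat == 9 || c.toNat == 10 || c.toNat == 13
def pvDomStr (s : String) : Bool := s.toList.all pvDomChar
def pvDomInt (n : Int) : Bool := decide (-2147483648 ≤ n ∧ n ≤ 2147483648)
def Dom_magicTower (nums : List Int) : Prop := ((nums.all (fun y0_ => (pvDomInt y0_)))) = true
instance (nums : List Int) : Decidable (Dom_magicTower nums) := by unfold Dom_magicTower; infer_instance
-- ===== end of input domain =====

-- B replaces A's heapq binary heap by a plain list of postponed negatives scanned linearly
-- (min + remove) at each deferral; same return value, no speed claim.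

-- ===== PORT A =====
-- Hand port of heapq (PySem has no heap); exact transliteration of CPython's
-- _siftdown/_siftup/heappush/heappop. All list indices touched by these routines are
-- in range at every call site reached from magicTower (standard heapq invariants),
-- so `getD _ 0` is exact there; heappop on [] (IndexError in Python) is unreachable
-- and guarded by the caller's isEmpty test. Each loop carries an explicit fuel that
-- provably exceeds its iteration count at every call site (a pure totality guard:
-- with enough fuel the fuel-0 branch coincides with the loop's exit).

-- _siftdown(heap, startpos, pos) body after 'newitem = heap[pos]'; fuel ≥ pos
def siftdownLoop (newitem : Int) : Nat → List Int → Nat → Nat → List Int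
  | 0, heap, _, pos => heap.set pos newitem
  | fuel + 1, heap, startpos, pos =>
    if startpos < pos then
      let parentpos := (pos - 1) / 2
      let parent := heap.getD parentpos 0
      if newitem < parent then
        siftdownLoop newitem fuel (heap.set pos parent) startpos parentpos
      else heap.set pos newitem
    else heap.set pos newitem

def heappush (heap : List Int) (item : Int) : List Int :=
  let h := heap ++ [item]
  siftdownLoop item (h.length - 1) h 0 (h.length - 1)

-- the while-loop of _siftup (childpos = 2*pos+1 on entry); fuel ≥ endpos - childpos
def siftupLoop (newitem : Int) (endpos : Nat) : Nat → List Int → Nat → Nat → List Int × Nat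
  | 0, heap, pos, _ => (heap, pos)
  | fuel + 1, heap, pos, childpos =>
    if childpos < endpos then
      let rightpos := childpos + 1
      let childpos' := if rightpos < endpos ∧ ¬ (heap.getD childpos 0 < heap.getD rightpos 0)
                       then rightpos else childpos
      siftupLoop newitem endpos fuel (heap.set pos (heap.getD childpos' 0)) childpos'
        (2 * childpos' + 1)
    else (heap, pos)

def siftup (heap : List Int) (pos : Nat) : List Int :=
  let endpos := heap.length
  let startpos := pos
  let newitem := heap.getD pos 0
  let r := siftupLoop newitem endpos endpos heap pos (2 * pos + 1)
  siftdownLoop newitem r.2 (r.1.set r.2 newitem) startpos r.2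

def heappop (heap : List Int) : Int × List Int :=
  let lastelt := heap.getLast?.getD 0    -- heap.pop(); [] raises IndexError (unreachable here)
  let rest := heap.dropLast
  if rest.isEmpty then (lastelt, [])
  else (rest.getD 0 0, siftup (rest.set 0 lastelt) 0)

-- the 'while blood <= 0' loop of A; fuel ≥ q.length bounds the number of pops
def loopA : Nat → List Int → Int → Int → List Int × Int × Int
  | 0, q, blood, count => (q, blood, count)
  | fuel + 1, q, blood, count =>
    if blood ≤ 0 then
      if q.isEmpty then (q, blood, count)   -- heappop([]) raises IndexError; unreachable
      else
        let p := heappop q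
        loopA fuel p.2 (blood - p.1) (count + 1)
    else (q, blood, count)

-- the 'for n in nums' loop of A
def goA : List Int → List Int → Int → Int → Int
  | [], _, _, count => count
  | n :: rest, q, blood, count =>
    let q1 := if n < 0 then heappush q n else q
    let s := loopA q1.length q1 (blood + n) count
    goA rest s.1 s.2.1 s.2.2

def magicTower (nums : List Int) : Int :=
  if nums.sum < -1 then -1 else goA nums [] 1 0

-- ===== PORT B =====
-- the 'while blood <= 0' loop of B (min + remove on a plain list); fuel ≥ q.length
def loopB : Nat → List Int → Int → Int → List Int × Int × Int
  | 0, q, blood, count => (q, blood, count)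
  | fuel + 1, q, blood, count =>
    if blood ≤ 0 then
      match PySem.List.min? q (fun x => x) with
      | none => (q, blood, count)       -- min([]) raises ValueError; unreachable
      | some m =>
        match PySem.List.remove? q m with
        | none => (q, blood, count)     -- q.remove(m) with m = min(q) ∈ q never raises
        | some q' => loopB fuel q' (blood - m) (count + 1)
    else (q, blood, count)

def goB : List Int → List Int → Int → Int → Int
  | [], _, _, count => count
  | n :: rest, q, blood, count =>
    let q1 := if n < 0 then q ++ [n] else q
    let s := loopB q1.length q1 (blood + n) count
    goB rest s.1 s.2.1 s.2.2

def magicTower_alt (nums : List Int) : Int :=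
  if nums.sum < -1 then -1 else goB nums [] 1 0

-- ===== PRECONDITION & SPEC =====
def Spec_magicTower (nums : List Int) (out : Int) : Prop := out = magicTower_alt nums
instance (nums : List Int) (out : Int) : Decidable (Spec_magicTower nums out) := by unfold Spec_magicTower; infer_instance

-- ===== CLAIM (what is proved, stated in full; the proofs are below) =====
def Claim_equal_magicTower : Prop := ∀ (nums : List Int), Dom_magicTower nums → Spec_magicTower nums (magicTower nums)

-- ===== LEMMAS AND PROOFS =====

-- heap invariant: every non-root element is ≥ its parent
def IsHeap (h : List Int) : Prop :=
  ∀ i, i < h.length → 0 < i → h.getD ((i - 1) / 2) 0 ≤ h.getD i 0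

lemma getD_set_self (l : List Int) (i : Nat) (a : Int) (hi : i < l.length) :
    (l.set i a).getD i 0 = a := by
  simp [List.getD_eq_getElem?_getD, hi]

lemma getD_set_ne (l : List Int) (i j : Nat) (a : Int) (hij : i ≠ j) :
    (l.set i a).getD j 0 = l.getD j 0 := by
  simp [List.getD_eq_getElem?_getD, List.getElem?_set_ne hij]

lemma msetSet (h : List Int) (i : Nat) (a : Int) (hi : i < h.length) :
    (↑(h.set i a) : Multiset Int) + {h.getD i 0} = (↑h : Multiset Int) + {a} := by
  rw [List.set_eq_take_append_cons_drop, if_pos hi, List.getD_eq_getElem _ _ hi]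
  conv_rhs => rw [← List.take_append_drop i h, List.drop_eq_getElem_cons hi]
  simp only [← Multiset.cons_coe, ← Multiset.coe_add, ← Multiset.singleton_add]
  abel

lemma siftdownLoop_length (newitem : Int) :
    ∀ (fuel : Nat) (heap : List Int) (startpos pos : Nat),
    (siftdownLoop newitem fuel heap startpos pos).length = heap.length := by
  intro fuel
  induction fuel with
  | zero => intro heap startpos pos; simp [siftdownLoop]
  | succ fuel ih =>
    intro heap startpos pos
    simp only [siftdownLoop]
    split_ifs <;> simp [ih, List.length_set]

lemma siftupLoop_length (newitem : Int) (endpos : Nat) :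
    ∀ (fuel : Nat) (heap : List Int) (pos childpos : Nat),
    (siftupLoop newitem endpos fuel heap pos childpos).1.length = heap.length := by
  intro fuel
  induction fuel with
  | zero => intro heap pos childpos; simp [siftupLoop]
  | succ fuel ih =>
    intro heap pos childpos
    simp only [siftupLoop]
    split_ifs <;> simp [ih, List.length_set]

lemma siftup_length (heap : List Int) (pos : Nat) :
    (siftup heap pos).length = heap.length := by
  unfold siftup
  simp [siftdownLoop_length, List.length_set, siftupLoop_length]

lemma heappop_length {heap : List Int} (h : ¬ heap.isEmpty) :
    (heappop heap).2.length < heap.length := by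
  unfold heappop
  dsimp only
  have hlen : 0 < heap.length := by
    cases heap with
    | nil => simp at h
    | cons a t => simp
  split
  · simpa using hlen
  · simp only [siftup_length, List.length_set, List.length_dropLast]
    omega

lemma siftdownLoop_mset (newitem : Int) (startpos : Nat) :
    ∀ (fuel : Nat) (heap : List Int) (pos : Nat), pos < heap.length → pos ≤ fuel →
    (↑(siftdownLoop newitem fuel heap startpos pos) : Multiset Int) + {heap.getD pos 0}
      = (↑heap : Multiset Int) + {newitem} := by
  intro fuel
  induction fuel with
  | zero =>
    intro heap pos hpos _
    simp only [siftdownLoop]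
    exact msetSet _ _ _ hpos
  | succ fuel ih =>
    intro heap pos hpos hf
    simp only [siftdownLoop]
    by_cases hsp : startpos < pos
    · simp only [if_pos hsp]
      by_cases hcmp : newitem < heap.getD ((pos - 1) / 2) 0
      · simp only [if_pos hcmp]
        have hne : pos ≠ (pos - 1) / 2 := by omega
        have ihh := ih (heap.set pos (heap.getD ((pos - 1) / 2) 0)) ((pos - 1) / 2)
          (by simp only [List.length_set]; omega) (by omega)
        rw [getD_set_ne heap pos ((pos - 1) / 2) _ hne] at ihh
        refine add_right_cancel (b := ({heap.getD ((pos - 1) / 2) 0} : Multiset Int)) ?_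
        rw [add_right_comm, ihh, add_right_comm, msetSet heap pos _ hpos, add_right_comm]
      · simp only [if_neg hcmp]
        exact msetSet _ _ _ hpos
    · simp only [if_neg hsp]
      exact msetSet _ _ _ hpos

-- placing `newitem` into the hole at `pos` yields a heap (exit step of _siftdown)
lemma siftdown_exit (newitem : Int) (heap : List Int) (pos : Nat)
    (hpos : pos < heap.length)
    (H1 : ∀ i, i < heap.length → 0 < i → i ≠ pos → (i - 1) / 2 ≠ pos →
      heap.getD ((i - 1) / 2) 0 ≤ heap.getD i 0)
    (H3 : ∀ c, c < heap.length → 0 < c → (c - 1) / 2 = pos → newitem ≤ heap.getD c 0)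
    (hpar : 0 < pos → heap.getD ((pos - 1) / 2) 0 ≤ newitem) :
    IsHeap (heap.set pos newitem) := by
  intro i hi h0i
  simp only [List.length_set] at hi
  by_cases hip : i = pos
  · have h0p : 0 < pos := hip ▸ h0i
    rw [hip, getD_set_self heap pos newitem hpos,
        getD_set_ne heap pos ((pos - 1) / 2) newitem (by omega)]
    exact hpar h0p
  · by_cases hcp : (i - 1) / 2 = pos
    · rw [hcp, getD_set_self heap pos newitem hpos,
          getD_set_ne heap pos i newitem (fun h => hip h.symm)]
      exact H3 i hi h0i hcp
    · rw [getD_set_ne heap pos ((i - 1) / 2) newitem (fun h => hcp h.symm),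
          getD_set_ne heap pos i newitem (fun h => hip h.symm)]
      exact H1 i hi h0i hip hcp

lemma siftdownLoop_heap (newitem : Int) :
    ∀ (fuel : Nat) (heap : List Int) (pos : Nat), pos < heap.length → pos ≤ fuel →
    (∀ i, i < heap.length → 0 < i → i ≠ pos → (i - 1) / 2 ≠ pos →
      heap.getD ((i - 1) / 2) 0 ≤ heap.getD i 0) →
    (∀ c, c < heap.length → 0 < pos → (c - 1) / 2 = pos →
      heap.getD ((pos - 1) / 2) 0 ≤ heap.getD c 0) →
    (∀ c, c < heap.length → 0 < c → (c - 1) / 2 = pos → newitem ≤ heap.getD c 0) →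
    IsHeap (siftdownLoop newitem fuel heap 0 pos) := by
  intro fuel
  induction fuel with
  | zero =>
    intro heap pos hpos hf H1 H2 H3
    simp only [siftdownLoop]
    exact siftdown_exit newitem heap pos hpos H1 H3 (fun h0 => absurd h0 (by omega))
  | succ fuel ih =>
    intro heap pos hpos hf H1 H2 H3
    simp only [siftdownLoop]
    by_cases hsp : 0 < pos
    · simp only [if_pos hsp]
      by_cases hcmp : newitem < heap.getD ((pos - 1) / 2) 0
      · simp only [if_pos hcmp]
        have hplt : (pos - 1) / 2 < heap.length := by omega
        refine ih (heap.set pos (heap.getD ((pos - 1) / 2) 0)) ((pos - 1) / 2)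
          (by simp only [List.length_set]; omega) (by omega) ?_ ?_ ?_
        · -- H1 for the new hole (pos - 1) / 2
          intro i hi h0i hne hpne
          simp only [List.length_set] at hi
          by_cases hip : i = pos
          · exact absurd (by omega : (i - 1) / 2 = (pos - 1) / 2) hpne
          · by_cases hcp : (i - 1) / 2 = pos
            · rw [hcp, getD_set_self heap pos _ hpos,
                  getD_set_ne heap pos i _ (fun h => hip h.symm)]
              exact H2 i hi hsp hcp
            · rw [getD_set_ne heap pos ((i - 1) / 2) _ (fun h => hcp h.symm),
                  getD_set_ne heap pos i _ (fun h => hip h.symm)]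
              exact H1 i hi h0i hip hcp
        · -- H2 for the new hole (pos - 1) / 2
          intro c hc h0pp hcp
          simp only [List.length_set] at hc
          have hgp : ((pos - 1) / 2 - 1) / 2 ≠ pos := by omega
          rw [getD_set_ne heap pos (((pos - 1) / 2 - 1) / 2) _ (fun h => hgp h.symm)]
          by_cases hcpos : c = pos
          · subst hcpos
            rw [getD_set_self heap c _ hpos]
            exact H1 ((c - 1) / 2) hplt h0pp (by omega) hgp
          · rw [getD_set_ne heap pos c _ (fun h => hcpos h.symm)]
            have h0c : 0 < c := by omega
            have h1c := H1 c hc h0c hcpos (by omega)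
            rw [hcp] at h1c
            exact le_trans (H1 ((pos - 1) / 2) hplt h0pp (by omega) hgp) h1c
        · -- H3 for the new hole (pos - 1) / 2
          intro c hc h0c hcp
          simp only [List.length_set] at hc
          by_cases hcpos : c = pos
          · subst hcpos
            rw [getD_set_self heap c _ hpos]
            exact le_of_lt hcmp
          · rw [getD_set_ne heap pos c _ (fun h => hcpos h.symm)]
            have h1c := H1 c hc h0c hcpos (by omega)
            rw [hcp] at h1c
            exact le_trans (le_of_lt hcmp) h1c
      · simp only [if_neg hcmp]
        exact siftdown_exit newitem heap pos hpos H1 H3 (fun _ => not_lt.1 hcmp)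
    · simp only [if_neg hsp]
      exact siftdown_exit newitem heap pos hpos H1 H3 (fun h0 => absurd h0 hsp)

lemma siftupLoop_spec (newitem : Int) (endpos : Nat) :
    ∀ (fuel : Nat) (heap : List Int) (pos childpos : Nat),
    endpos = heap.length → childpos = 2 * pos + 1 → pos < endpos →
    endpos - childpos ≤ fuel →
    (∀ i, i < heap.length → 0 < i → i ≠ pos → (i - 1) / 2 ≠ pos →
      heap.getD ((i - 1) / 2) 0 ≤ heap.getD i 0) →
    (∀ c, c < heap.length → 0 < pos → (c - 1) / 2 = pos →
      heap.getD ((pos - 1) / 2) 0 ≤ heap.getD c 0) →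
    (siftupLoop newitem endpos fuel heap pos childpos).2 < endpos ∧
    endpos ≤ 2 * (siftupLoop newitem endpos fuel heap pos childpos).2 + 1 ∧
    (↑((siftupLoop newitem endpos fuel heap pos childpos).1.set
        (siftupLoop newitem endpos fuel heap pos childpos).2 newitem) : Multiset Int)
      = ↑(heap.set pos newitem) ∧
    (∀ i, i < (siftupLoop newitem endpos fuel heap pos childpos).1.length → 0 < i →
      i ≠ (siftupLoop newitem endpos fuel heap pos childpos).2 →
      (i - 1) / 2 ≠ (siftupLoop newitem endpos fuel heap pos childpos).2 →
      (siftupLoop newitem endpos fuel heap pos childpos).1.getD ((i - 1) / 2) 0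
        ≤ (siftupLoop newitem endpos fuel heap pos childpos).1.getD i 0) := by
  intro fuel
  induction fuel with
  | zero =>
    intro heap pos childpos hend hc hpos hf H1 H2
    simp only [siftupLoop]
    exact ⟨hpos, by omega, by trivial, fun i hi h0i hne hpne => H1 i hi h0i hne hpne⟩
  | succ fuel ih =>
    intro heap pos childpos hend hc hpos hf H1 H2
    simp only [siftupLoop]
    by_cases hlt : childpos < endpos
    · simp only [if_pos hlt]
      set cp := (if childpos + 1 < endpos ∧ ¬ heap.getD childpos 0 < heap.getD (childpos + 1) 0
                 then childpos + 1 else childpos) with hcpdef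
      have hposlen : pos < heap.length := hend ▸ hpos
      obtain ⟨hcpe, hchild, hposlt, hclo, hmin⟩ :
          cp < endpos ∧ (cp - 1) / 2 = pos ∧ pos < cp ∧ childpos ≤ cp ∧
            (∀ i, i < endpos → 0 < i → (i - 1) / 2 = pos →
              heap.getD cp 0 ≤ heap.getD i 0) := by
        by_cases H : childpos + 1 < endpos ∧ ¬ heap.getD childpos 0 < heap.getD (childpos + 1) 0
        · have hv : cp = childpos + 1 := by rw [hcpdef, if_pos H]
          refine ⟨by omega, by omega, by omega, by omega, ?_⟩
          intro i hi h0i hci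
          have : i = childpos ∨ i = childpos + 1 := by omega
          rcases this with h | h
          · subst h; rw [hv]; exact not_lt.1 H.2
          · subst h; rw [hv]
        · have hv : cp = childpos := by rw [hcpdef, if_neg H]
          push Not at H
          refine ⟨by omega, by omega, by omega, by omega, ?_⟩
          intro i hi h0i hci
          have : i = childpos ∨ i = childpos + 1 := by omega
          rcases this with h | h
          · subst h; rw [hv]
          · subst h; rw [hv]; exact le_of_lt (H (by omega))
      have hcpl : cp < heap.length := hend ▸ hcpe
      have hgne : pos ≠ cp := by omega
      have H1' : ∀ i, i < (heap.set pos (heap.getD cp 0)).length → 0 < i → i ≠ cp →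
          (i - 1) / 2 ≠ cp →
          (heap.set pos (heap.getD cp 0)).getD ((i - 1) / 2) 0
            ≤ (heap.set pos (heap.getD cp 0)).getD i 0 := by
        intro i hi h0i hne hpne
        simp only [List.length_set] at hi
        by_cases hip : i = pos
        · subst hip
          rw [getD_set_ne heap i ((i - 1) / 2) _ (by omega), getD_set_self heap i _ hposlen]
          exact H2 cp hcpl h0i hchild
        · by_cases hcip : (i - 1) / 2 = pos
          · rw [hcip, getD_set_self heap pos _ hposlen,
                getD_set_ne heap pos i _ (fun h => hip h.symm)]
            exact hmin i (by omega) h0i hcip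
          · rw [getD_set_ne heap pos ((i - 1) / 2) _ (fun h => hcip h.symm),
                getD_set_ne heap pos i _ (fun h => hip h.symm)]
            exact H1 i hi h0i hip hcip
      have H2' : ∀ c, c < (heap.set pos (heap.getD cp 0)).length → 0 < cp →
          (c - 1) / 2 = cp →
          (heap.set pos (heap.getD cp 0)).getD ((cp - 1) / 2) 0
            ≤ (heap.set pos (heap.getD cp 0)).getD c 0 := by
        intro c hcl h0cp hcc
        simp only [List.length_set] at hcl
        rw [hchild, getD_set_self heap pos _ hposlen, getD_set_ne heap pos c _ (by omega)]
        have h1c := H1 c hcl (by omega) (by omega) (by omega)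
        rw [hcc] at h1c
        exact h1c
      obtain ⟨ih1, ih2, ih3, ih4⟩ :=
        ih (heap.set pos (heap.getD cp 0)) cp (2 * cp + 1)
          (by simp only [List.length_set]; exact hend) rfl hcpe (by omega) H1' H2'
      refine ⟨ih1, ih2, ?_, ih4⟩
      rw [ih3]
      refine add_right_cancel (b := ({heap.getD cp 0} : Multiset Int)) ?_
      have e1 := msetSet (heap.set pos (heap.getD cp 0)) cp newitem
        (by simp only [List.length_set]; exact hcpl)
      rw [getD_set_ne heap pos cp _ hgne] at e1
      rw [e1]
      refine add_right_cancel (b := ({heap.getD pos 0} : Multiset Int)) ?_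
      conv_lhs => rw [add_right_comm, msetSet heap pos (heap.getD cp 0) hposlen]
      conv_rhs => rw [add_right_comm, msetSet heap pos newitem hposlen]
      exact add_right_comm _ _ _
    · simp only [if_neg hlt]
      exact ⟨hpos, by omega, by trivial, fun i hi h0i hne hpne => H1 i hi h0i hne hpne⟩

lemma getD_append_left (l : List Int) (a : Int) (j : Nat) (h : j < l.length) :
    (l ++ [a]).getD j 0 = l.getD j 0 := by
  simp [List.getD_eq_getElem?_getD, List.getElem?_append_left h]

lemma getD_dropLast (l : List Int) (j : Nat) (h : j < l.dropLast.length) :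
    l.dropLast.getD j 0 = l.getD j 0 := by
  rw [List.getD_eq_getElem _ _ h, List.getElem_dropLast,
    List.getD_eq_getElem _ _ (by simp at h; omega)]

lemma heappush_spec (heap : List Int) (item : Int) (hh : IsHeap heap) :
    IsHeap (heappush heap item) ∧
    (↑(heappush heap item) : Multiset Int) = item ::ₘ (↑heap : Multiset Int) := by
  unfold heappush
  dsimp only
  have hlen : (heap ++ [item]).length - 1 = heap.length := by simp
  rw [hlen]
  have hplen : heap.length < (heap ++ [item]).length := by simp
  constructor
  · refine siftdownLoop_heap item heap.length (heap ++ [item]) heap.length hplen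
      (le_refl _) ?_ ?_ ?_
    · intro i hi h0i hne hpne
      simp only [List.length_append, List.length_cons, List.length_nil] at hi
      have hil : i < heap.length := by omega
      rw [getD_append_left heap item i hil,
          getD_append_left heap item ((i - 1) / 2) (by omega)]
      exact hh i hil h0i
    · intro c hc h0p hcc
      simp only [List.length_append, List.length_cons, List.length_nil] at hc
      exact absurd hcc (by omega)
    · intro c hc h0c hcc
      simp only [List.length_append, List.length_cons, List.length_nil] at hc
      exact absurd hcc (by omega)
  · have hm := siftdownLoop_mset item 0 heap.length (heap ++ [item]) heap.length hplen
      (le_refl _)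
    rw [show (heap ++ [item]).getD heap.length 0 = item by
          simp [List.getD_eq_getElem?_getD]] at hm
    have := add_right_cancel hm
    rw [this]
    exact Multiset.coe_eq_coe.2 (List.perm_append_singleton _ _)

lemma siftup0_spec (g : List Int) (hg : 0 < g.length)
    (H1 : ∀ i, i < g.length → 0 < i → (i - 1) / 2 ≠ 0 →
      g.getD ((i - 1) / 2) 0 ≤ g.getD i 0) :
    IsHeap (siftup g 0) ∧ (↑(siftup g 0) : Multiset Int) = (↑g : Multiset Int) := by
  unfold siftup
  dsimp only
  obtain ⟨s1, s2, s3, s4⟩ := siftupLoop_spec (g.getD 0 0) g.length g.length g 0 (2 * 0 + 1)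
    rfl rfl hg (by omega)
    (fun i hi h0i hne hpne => H1 i hi h0i hpne)
    (fun c hc h0 hcc => absurd h0 (by omega))
  have hr1len : (siftupLoop (g.getD 0 0) g.length g.length g 0 (2 * 0 + 1)).1.length
      = g.length := siftupLoop_length _ _ _ _ _ _
  have hr2len : (siftupLoop (g.getD 0 0) g.length g.length g 0 (2 * 0 + 1)).2
      < ((siftupLoop (g.getD 0 0) g.length g.length g 0 (2 * 0 + 1)).1.set
          (siftupLoop (g.getD 0 0) g.length g.length g 0 (2 * 0 + 1)).2 (g.getD 0 0)).length := by
    simp only [List.length_set, hr1len]; exact s1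
  constructor
  · refine siftdownLoop_heap (g.getD 0 0) _ _ _ hr2len (le_refl _) ?_ ?_ ?_
    · intro i hi h0i hne hpne
      simp only [List.length_set, hr1len] at hi
      rw [getD_set_ne _ _ _ _ (fun h => hne h.symm),
          getD_set_ne _ _ _ _ (fun h => hpne h.symm)]
      exact s4 i (by omega) h0i hne hpne
    · intro c hc h0 hcc
      simp only [List.length_set, hr1len] at hc
      exact absurd hcc (by omega)
    · intro c hc h0c hcc
      simp only [List.length_set, hr1len] at hc
      exact absurd hcc (by omega)
  · have hm := siftdownLoop_mset (g.getD 0 0) 0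
      (siftupLoop (g.getD 0 0) g.length g.length g 0 (2 * 0 + 1)).2
      ((siftupLoop (g.getD 0 0) g.length g.length g 0 (2 * 0 + 1)).1.set
        (siftupLoop (g.getD 0 0) g.length g.length g 0 (2 * 0 + 1)).2 (g.getD 0 0))
      (siftupLoop (g.getD 0 0) g.length g.length g 0 (2 * 0 + 1)).2 hr2len (le_refl _)
    rw [getD_set_self _ _ _ (by omega)] at hm
    have hms := add_right_cancel hm
    rw [hms, s3]
    have e := msetSet g 0 (g.getD 0 0) hg
    exact add_right_cancel e

lemma heappop_spec (heap : List Int) (hne : ¬ heap.isEmpty) (hh : IsHeap heap) :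
    (heappop heap).1 = heap.getD 0 0 ∧
    (↑heap : Multiset Int) = (heappop heap).1 ::ₘ (↑(heappop heap).2 : Multiset Int) ∧
    IsHeap (heappop heap).2 := by
  have hnil : heap ≠ [] := by cases heap <;> simp_all
  have hlast : heap.getLast?.getD 0 = heap.getLast hnil := by
    rw [List.getLast?_eq_some_getLast hnil]; rfl
  have hsplit : (↑heap : Multiset Int) = ↑heap.dropLast + {heap.getLast?.getD 0} := by
    conv_lhs => rw [← List.dropLast_append_getLast hnil]
    rw [hlast, ← Multiset.coe_singleton, ← Multiset.coe_add]
  unfold heappop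
  dsimp only
  split
  · -- heap = [lastelt]
    rename_i hemp
    have h1 : heap.length = 1 := by
      have hd := List.length_dropLast (xs := heap)
      have h0 : 0 < heap.length := List.length_pos_of_ne_nil hnil
      have : heap.dropLast = [] := by simpa [List.isEmpty_iff] using hemp
      rw [this] at hd
      simp at hd
      omega
    obtain ⟨a, ha⟩ := List.length_eq_one_iff.1 h1
    subst ha
    refine ⟨rfl, ?_, ?_⟩
    · simp
    · intro i hi h0i; simp at hi
  · rename_i hemp
    have hrpos : 0 < heap.dropLast.length :=
      List.length_pos_of_ne_nil (by simpa [List.isEmpty_iff] using hemp)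
    have hrlt : heap.dropLast.length < heap.length := by
      have hd := List.length_dropLast (xs := heap)
      have h0 : 0 < heap.length := List.length_pos_of_ne_nil hnil
      omega
    have hglen : 0 < (heap.dropLast.set 0 (heap.getLast?.getD 0)).length := by
      simpa using hrpos
    have Hg : ∀ i, i < (heap.dropLast.set 0 (heap.getLast?.getD 0)).length → 0 < i →
        (i - 1) / 2 ≠ 0 →
        (heap.dropLast.set 0 (heap.getLast?.getD 0)).getD ((i - 1) / 2) 0
          ≤ (heap.dropLast.set 0 (heap.getLast?.getD 0)).getD i 0 := by
      intro i hi h0i hpne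
      simp only [List.length_set] at hi
      rw [getD_set_ne _ _ _ _ (fun h => hpne h.symm),
          getD_set_ne _ _ _ _ (by omega),
          getD_dropLast heap i hi, getD_dropLast heap ((i - 1) / 2) (by omega)]
      exact hh i (by omega) h0i
    obtain ⟨hheap, hmset⟩ := siftup0_spec (heap.dropLast.set 0 (heap.getLast?.getD 0))
      hglen Hg
    refine ⟨getD_dropLast heap 0 hrpos, ?_, hheap⟩
    rw [hmset]
    have e := msetSet heap.dropLast 0 (heap.getLast?.getD 0) hrpos
    rw [getD_dropLast heap 0 hrpos] at e
    rw [← Multiset.singleton_add, hsplit, ← e, add_comm]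
    rw [show ((heap.dropLast.getD 0 0, siftup (heap.dropLast.set 0 (heap.getLast?.getD 0)) 0).1)
          = heap.dropLast.getD 0 0 from rfl, getD_dropLast heap 0 hrpos]

lemma isHeap_root_min (h : List Int) (hh : IsHeap h) :
    ∀ i, i < h.length → h.getD 0 0 ≤ h.getD i 0 := by
  intro i
  induction i using Nat.strong_induction_on with
  | _ i ih =>
    intro hi
    rcases Nat.eq_zero_or_pos i with h0 | h0
    · subst h0; exact le_refl _
    · exact le_trans (ih ((i - 1) / 2) (by omega) (by omega)) (hh i hi h0)

lemma isHeap_min (h : List Int) (hh : IsHeap h) : ∀ x ∈ h, h.getD 0 0 ≤ x := by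
  intro x hx
  obtain ⟨i, hi, hg⟩ := List.getElem_of_mem hx
  have := isHeap_root_min h hh i hi
  rwa [List.getD_eq_getElem _ _ hi, hg] at this

lemma loop_equiv_aux (n : Nat) : ∀ (qA qB : List Int) (blood count : Int),
    qA.length ≤ n → (↑qA : Multiset Int) = ↑qB → IsHeap qA →
    (loopA n qA blood count).2 = (loopB n qB blood count).2 ∧
    (↑(loopA n qA blood count).1 : Multiset Int) = ↑(loopB n qB blood count).1 ∧
    IsHeap (loopA n qA blood count).1 := by
  induction n with
  | zero =>
    intro qA qB blood count hlen hm hh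
    simp only [loopA, loopB]
    exact ⟨by trivial, hm, hh⟩
  | succ n ih =>
    intro qA qB blood count hlen hm hh
    simp only [loopA, loopB]
    by_cases hb : blood ≤ 0
    · by_cases hA : qA = []
      · subst hA
        have hB : qB = [] := by
          have : (↑qB : Multiset Int) = 0 := hm.symm
          simpa using this
        subst hB
        have hIsH : IsHeap ([] : List Int) := fun i hi h0 => by simp at hi
        simp [hb, (PySem.List.min?_eq_none_iff ([] : List Int) (fun x => x)).2 rfl, hIsH]
      · have hAe : qA.isEmpty = false := by simp [hA]
        have hAne : ¬ qA.isEmpty := by simp [hAe]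
        obtain ⟨hp1, hp2, hp3⟩ := heappop_spec qA hAne hh
        have hBne : qB ≠ [] := by
          intro hB
          apply hA
          have : (↑qA : Multiset Int) = 0 := by rw [hm, hB]; rfl
          simpa using this
        obtain ⟨m, hmq⟩ : ∃ m, PySem.List.min? qB (fun x => x) = some m := by
          cases hq : PySem.List.min? qB (fun x => x) with
          | none => exact absurd ((PySem.List.min?_eq_none_iff qB _).1 hq) hBne
          | some m => exact ⟨m, rfl⟩
        have hmmem : m ∈ qB := PySem.List.min?_mem hmq
        have hmmin : ∀ y ∈ qB, m ≤ y := PySem.List.min?_isMin hmq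
        have hmemiff : ∀ x : Int, x ∈ qA ↔ x ∈ qB := by
          intro x
          constructor <;> intro hx
          · have : x ∈ (↑qB : Multiset Int) := by rw [← hm]; exact Multiset.mem_coe.2 hx
            exact Multiset.mem_coe.1 this
          · have : x ∈ (↑qA : Multiset Int) := by rw [hm]; exact Multiset.mem_coe.2 hx
            exact Multiset.mem_coe.1 this
        have hrootmem : qA.getD 0 0 ∈ qA := by
          have h0 : 0 < qA.length := List.length_pos_of_ne_nil hA
          rw [List.getD_eq_getElem _ _ h0]
          exact List.getElem_mem h0
        have hmeq : m = qA.getD 0 0 := by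
          refine le_antisymm (hmmin _ ((hmemiff _).1 hrootmem)) ?_
          exact isHeap_min qA hh m ((hmemiff m).2 hmmem)
        have hrem : PySem.List.remove? qB m = some (qB.erase m) :=
          PySem.List.remove?_eq_some_erase qB m hmmem
        have hlenA : (heappop qA).2.length ≤ n := by
          have := heappop_length hAne
          omega
        have hmset' : (↑(heappop qA).2 : Multiset Int) = ↑(qB.erase m) := by
          have hcons : m ::ₘ (↑(heappop qA).2 : Multiset Int) = ↑qA := by
            rw [hmeq, ← hp1]; exact hp2.symm
          have hcons2 : m ::ₘ (↑(qB.erase m) : Multiset Int) = ↑qB := by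
            rw [← Multiset.coe_erase]
            exact Multiset.cons_erase (Multiset.mem_coe.2 hmmem)
          exact (Multiset.cons_inj_right m).1 (by rw [hcons, hcons2, hm])
        have hrec := ih (heappop qA).2 (qB.erase m) (blood - m) (count + 1)
          hlenA hmset' hp3
        simp only [if_pos hb, hAe, Bool.false_eq_true, if_false, hmq, hrem]
        rw [hp1, ← hmeq]
        simpa using hrec
    · simp [hb, hm, hh]

lemma go_equiv (rest : List Int) (qA qB : List Int) (blood count : Int)
    (hm : (↑qA : Multiset Int) = ↑qB) (hh : IsHeap qA) :
    goA rest qA blood count = goB rest qB blood count := by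
  induction rest generalizing qA qB blood count with
  | nil => rfl
  | cons n rest ih =>
    simp only [goA, goB]
    have hpush : (↑(if n < 0 then heappush qA n else qA) : Multiset Int)
        = ↑(if n < 0 then qB ++ [n] else qB) ∧
        IsHeap (if n < 0 then heappush qA n else qA) := by
      by_cases hn : n < 0
      · simp only [if_pos hn]
        refine ⟨?_, (heappush_spec qA n hh).1⟩
        rw [(heappush_spec qA n hh).2, hm]
        exact (Multiset.coe_eq_coe.2 (List.perm_append_singleton _ _)).symm
      · simp only [if_neg hn]
        exact ⟨hm, hh⟩
    have hleq : (if n < 0 then heappush qA n else qA).length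
        = (if n < 0 then qB ++ [n] else qB).length :=
      (Multiset.coe_eq_coe.1 hpush.1).length_eq
    rw [← hleq]
    have hloop := loop_equiv_aux (if n < 0 then heappush qA n else qA).length
      (if n < 0 then heappush qA n else qA) (if n < 0 then qB ++ [n] else qB)
      (blood + n) count (le_refl _) hpush.1 hpush.2
    rw [hloop.1]
    exact ih _ _ _ _ hloop.2.1 hloop.2.2

-- ===== VERDICT (by name: the statement is the Claim_ definition above) =====
theorem magicTower_spec : Claim_equal_magicTower := by
  intro nums _
  unfold Spec_magicTower magicTower magicTower_alt
  split
  · rfl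
  · exact go_equiv nums [] [] 1 0 rfl (by intro i hi h0; simp at hi)
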